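-- pv_equiv track=rewrite | github.com/pypi-data/pypi-mirror-398 | packages/wallypub/wallypub-1.0.1.tar.gz/wallypub-1.0.1/src/wallypub/epub_builder/from_wallabag.py | filter_duplicate_articles
-- ===== SOURCE A (Python) =====
-- def filter_duplicate_articles(entries) -> ([], []):
--     """
--     filter_duplicate_articles removes articles with the same id from the array.
--     :param entries:
--     :return:
--     """
--     ids = set()
--     dup_ids = set()
--     unique_entries = [
--         entry
--         for entry in entries
--         if entry["id"] not in ids and not ids.add(entry["id"])
--     ]
--     duplicate_entries = [
--         entry for entry in entries if entry["id"] in dup_ids or dup_ids.add(entry["id"])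
--     ]
--
--     return unique_entries, duplicate_entries
-- ===== SOURCE B (Python) =====
-- def filter_duplicate_articles(entries) -> ([], []):
--     """Single pass: one seen-set decides unique vs duplicate."""
--     seen = set()
--     unique_entries = []
--     duplicate_entries = []
--     for entry in entries:
--         i = entry["id"]
--         if i in seen:
--             duplicate_entries.append(entry)
--         else:
--             seen.add(i)
--             unique_entries.append(entry)
--     return unique_entries, duplicate_entries
-- ===== Notes on version B (the rewrite author's own statement) =====
-- stated objective: simpler
-- what changed: Replaced A's two side-effecting comprehensions over the list (one set each) with a single explicit loop maintaining one seen-set that routes each entry to unique or duplicate.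
import Mathlib
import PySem

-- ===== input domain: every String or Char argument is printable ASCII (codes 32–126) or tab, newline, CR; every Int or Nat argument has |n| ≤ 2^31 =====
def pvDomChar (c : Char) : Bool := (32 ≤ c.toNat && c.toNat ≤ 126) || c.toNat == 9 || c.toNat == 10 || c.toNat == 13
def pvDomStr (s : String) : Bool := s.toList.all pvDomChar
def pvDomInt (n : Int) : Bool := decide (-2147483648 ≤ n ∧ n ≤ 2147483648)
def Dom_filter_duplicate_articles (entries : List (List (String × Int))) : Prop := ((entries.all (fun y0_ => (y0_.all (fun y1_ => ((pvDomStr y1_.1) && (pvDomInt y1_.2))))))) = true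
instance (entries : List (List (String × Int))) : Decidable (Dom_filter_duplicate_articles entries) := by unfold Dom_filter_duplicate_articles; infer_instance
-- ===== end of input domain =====

-- B replaces A's two side-effecting comprehensions (two passes, two sets) with one
-- explicit loop and a single seen-set; return-value equivalence is proved on entries
-- that all carry an "id" key (A raises KeyError otherwise).

-- shared helper: entry["id"] (both Pythons evaluate exactly this dict lookup;
-- total form getD 0 is only used under Pre_, where the key is present)
def pvGetId (e : List (String × Int)) : Int := ((PySem.Dict.mk e).get? "id").getD 0

-- ===== PORT A =====
-- first comprehension: include iff id not yet in ids (adding it as a side effect)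
def faPass1 : List (List (String × Int)) → PySem.Set Int → List (List (String × Int))
  | [], _ => []
  | e :: rest, ids =>
    if PySem.Set.contains ids (pvGetId e) then faPass1 rest ids
    else e :: faPass1 rest (PySem.Set.add ids (pvGetId e))

-- second comprehension: include iff id already in dup_ids (adding it otherwise)
def faPass2 : List (List (String × Int)) → PySem.Set Int → List (List (String × Int))
  | [], _ => []
  | e :: rest, dupIds =>
    if PySem.Set.contains dupIds (pvGetId e) then e :: faPass2 rest dupIds
    else faPass2 rest (PySem.Set.add dupIds (pvGetId e))

def filter_duplicate_articles (entries : List (List (String × Int))) : (List (List (String × Int))) × (List (List (String × Int))) :=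
  (faPass1 entries PySem.Set.empty, faPass2 entries PySem.Set.empty)

-- ===== PORT B =====
-- single pass over entries, one seen-set, two accumulators
def fbLoop : List (List (String × Int)) → PySem.Set Int → List (List (String × Int)) → List (List (String × Int)) → (List (List (String × Int))) × (List (List (String × Int)))
  | [], _, u, d => (u, d)
  | e :: rest, seen, u, d =>
    if PySem.Set.contains seen (pvGetId e) then fbLoop rest seen u (d ++ [e])
    else fbLoop rest (PySem.Set.add seen (pvGetId e)) (u ++ [e]) d

def filter_duplicate_articles_alt (entries : List (List (String × Int))) : (List (List (String × Int))) × (List (List (String × Int))) :=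
  fbLoop entries PySem.Set.empty [] []

-- ===== PRECONDITION & SPEC =====
-- Pre_ excludes entries missing the key "id": there Python A raises KeyError.
def Pre_filter_duplicate_articles (entries : List (List (String × Int))) : Prop :=
  entries.all (fun e => e.any (fun p => p.1 == "id")) = true
instance (entries : List (List (String × Int))) : Decidable (Pre_filter_duplicate_articles entries) := by unfold Pre_filter_duplicate_articles; infer_instance
def pvWitness_filter_duplicate_articles : (List (List (String × Int))) := [[("id", 1)], [("id", 1)], [("id", 2)]]

def Spec_filter_duplicate_articles (entries : List (List (String × Int))) (out : (List (List (String × Int))) × (List (List (String × Int)))) : Prop := out = filter_duplicate_articles_alt entries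
instance (entries : List (List (String × Int))) (out : (List (List (String × Int))) × (List (List (String × Int)))) : Decidable (Spec_filter_duplicate_articles entries out) := by unfold Spec_filter_duplicate_articles; infer_instance

-- ===== CLAIM (what is proved, stated in full; the proofs are below) =====
def Claim_equal_filter_duplicate_articles : Prop := ∀ (entries : List (List (String × Int))), Dom_filter_duplicate_articles entries → Pre_filter_duplicate_articles entries → Spec_filter_duplicate_articles entries (filter_duplicate_articles entries)

-- ===== LEMMAS AND PROOFS =====
-- B's single loop with seen-set s computes exactly A's two passes from the same set s:
-- when the id is in s, pass1 skips and pass2 keeps (both sets unchanged); otherwise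
-- pass1 keeps and pass2 skips (both sets gain the id) — the two sets stay equal.
theorem fbLoop_eq (l : List (List (String × Int))) : ∀ (s : PySem.Set Int) (u d : List (List (String × Int))),
    fbLoop l s u d = (u ++ faPass1 l s, d ++ faPass2 l s) := by
  induction l with
  | nil => intro s u d; simp [fbLoop, faPass1, faPass2]
  | cons e rest ih =>
    intro s u d
    simp only [fbLoop, faPass1, faPass2]
    split_ifs with h <;> simp [ih]

-- ===== VERDICT (by name: the statement is the Claim_ definition above) =====
theorem filter_duplicate_articles_spec : Claim_equal_filter_duplicate_articles := by
  intro entries _ _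
  unfold Spec_filter_duplicate_articles filter_duplicate_articles filter_duplicate_articles_alt
  simp [fbLoop_eq]
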